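-- pv_equiv track=rewrite | github.com/olsenw/LeetCodeExercises | Python3/maximum_frequency_of_an_element_after_performing_operations_II.py | maxFrequency_tle
-- ===== SOURCE A (Python) =====
-- import bisect
-- from typing import List, Dict, Set, Optional
--
-- def maxFrequency_tle(nums: List[int], k: int, numOperations: int) -> int:
--     answer = 0
--     nums.sort()
--     i,j = 0,0
--     # try every possible answer
--     for n in range(nums[0], nums[-1] + 1):
--         pass
--         # do sliding window
--         while nums[i] < n - k:
--             i += 1
--         while j < len(nums) and nums[j] <= n + k:
--             j += 1
--         a = bisect.bisect_left(nums, n)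
--         b = bisect.bisect(nums, n)
--         actual = b - a
--         ops = j - i - actual
--         answer = max(answer, actual + min(numOperations, ops))
--     return answer
-- ===== SOURCE B (Python) =====
-- import bisect
--
-- def maxFrequency_tle(nums, k, numOperations):
--     # Evaluate only O(n) candidate targets (each value and each value+k)
--     # instead of sweeping every integer between min and max.
--     # Note: unlike A, this does not sort `nums` in place.
--     s = sorted(nums)
--     best = 0
--     for c in s + [x + k for x in s]:
--         window = bisect.bisect_right(s, c + k) - bisect.bisect_left(s, c - k)
--         cnt = bisect.bisect_right(s, c) - bisect.bisect_left(s, c)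
--         best = max(best, min(window, cnt + numOperations))
--     return best
-- ===== Notes on version B (the rewrite author's own statement) =====
-- stated objective: faster
-- what changed: Instead of sweeping every integer target n from min(nums) to max(nums) with a sliding window, B evaluates only the O(n) candidate targets (each value x and each x+k) with two bisects per candidate, using the fact that the optimum min(window, count+numOperations) is always attained at such a candidate.
import Mathlib
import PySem

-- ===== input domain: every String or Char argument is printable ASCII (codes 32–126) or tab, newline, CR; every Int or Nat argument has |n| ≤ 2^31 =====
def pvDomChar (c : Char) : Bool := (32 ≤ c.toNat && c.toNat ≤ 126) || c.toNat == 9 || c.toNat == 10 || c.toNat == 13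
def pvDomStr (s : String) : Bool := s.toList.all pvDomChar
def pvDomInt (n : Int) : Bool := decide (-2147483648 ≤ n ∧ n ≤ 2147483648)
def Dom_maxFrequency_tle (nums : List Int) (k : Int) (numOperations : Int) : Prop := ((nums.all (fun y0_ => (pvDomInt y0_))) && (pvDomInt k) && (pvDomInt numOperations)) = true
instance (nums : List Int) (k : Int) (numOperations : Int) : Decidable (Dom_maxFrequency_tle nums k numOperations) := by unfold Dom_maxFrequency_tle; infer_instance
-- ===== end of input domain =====

-- B replaces A's sweep over every integer in [min(nums), max(nums)] by the O(n) candidate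
-- targets {x, x+k : x ∈ nums}, two bisects each (objective: faster, asymptotically).
-- NOTE: Python A sorts `nums` IN PLACE; B does not mutate its argument. The equivalence
-- proved here is about the RETURN value only.

-- ===== PORT A =====
-- `while nums[i] < n - k: i += 1` (the `i < length` guard only makes the recursion total;
-- inside Pre_ Python never reaches the end here)
def advI (s : List Int) (b : Int) (i : Nat) : Nat :=
  if h : i < s.length then (if s[i] < b then advI s b (i + 1) else i) else i
  termination_by s.length - i

-- `while j < len(nums) and nums[j] <= n + k: j += 1`
def advJ (s : List Int) (b : Int) (j : Nat) : Nat :=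
  if h : j < s.length then (if s[j] ≤ b then advJ s b (j + 1) else j) else j
  termination_by s.length - j

-- one iteration of A's `for n in range(...)` loop, state = (answer, i, j)
def stepA (s : List Int) (k : Int) (numOperations : Int) (st : Int × Nat × Nat) (n : Int) : Int × Nat × Nat :=
  let i := advI s (n - k) st.2.1
  let j := advJ s (n + k) st.2.2
  let a := PySem.List.bisectLeft s n
  let b := PySem.List.bisectRight s n
  let actual : Int := (b : Int) - (a : Int)
  let ops : Int := (j : Int) - (i : Int) - actual
  (max st.1 (actual + min numOperations ops), i, j)

def maxFrequency_tle (nums : List Int) (k : Int) (numOperations : Int) : Int :=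
  let s := PySem.List.sorted nums (fun x => x) false
  match PySem.List.pyGet? s 0, PySem.List.pyGet? s (-1) with
  | some lo, some hi =>
      ((PySem.List.pyRange lo (hi + 1) 1).foldl (stepA s k numOperations) (0, 0, 0)).1
  | _, _ => 0   -- IndexError in Python (nums == []); excluded by Pre_

-- ===== PORT B =====
def maxFrequency_tle_alt (nums : List Int) (k : Int) (numOperations : Int) : Int :=
  let s := PySem.List.sorted nums (fun x => x) false
  (s ++ s.map (fun x => x + k)).foldl (fun best c =>
    let window : Int := (PySem.List.bisectRight s (c + k) : Int) - (PySem.List.bisectLeft s (c - k) : Int)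
    let cnt : Int := (PySem.List.bisectRight s c : Int) - (PySem.List.bisectLeft s c : Int)
    max best (min window (cnt + numOperations))) 0

-- ===== PRECONDITION & SPEC =====
-- Pre_ excludes exactly the inputs where Python A raises IndexError: the empty list
-- (nums[0]) and k < 0 (the first while loop runs past the end of the list).
def Pre_maxFrequency_tle (nums : List Int) (k : Int) (numOperations : Int) : Prop :=
  nums ≠ [] ∧ 0 ≤ k
instance (nums : List Int) (k : Int) (numOperations : Int) : Decidable (Pre_maxFrequency_tle nums k numOperations) := by unfold Pre_maxFrequency_tle; infer_instance

def pvWitness_maxFrequency_tle : List Int × Int × Int := ([1, 2, 2, 5], 1, 1)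

def Spec_maxFrequency_tle (nums : List Int) (k : Int) (numOperations : Int) (out : Int) : Prop := out = maxFrequency_tle_alt nums k numOperations
instance (nums : List Int) (k : Int) (numOperations : Int) (out : Int) : Decidable (Spec_maxFrequency_tle nums k numOperations out) := by unfold Spec_maxFrequency_tle; infer_instance

-- ===== CLAIM (what is proved, stated in full; the proofs are below) =====
def Claim_equal_maxFrequency_tle : Prop := ∀ (nums : List Int) (k : Int) (numOperations : Int), Dom_maxFrequency_tle nums k numOperations → Pre_maxFrequency_tle nums k numOperations → Spec_maxFrequency_tle nums k numOperations (maxFrequency_tle nums k numOperations)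

-- ===== LEMMAS AND PROOFS =====

-- the value A computes for target n (= what B computes for candidate n), on the sorted list
def Fval (s : List Int) (k numOperations n : Int) : Int :=
  min ((PySem.List.bisectRight s (n + k) : Int) - (PySem.List.bisectLeft s (n - k) : Int))
      (((PySem.List.bisectRight s n : Int) - (PySem.List.bisectLeft s n : Int)) + numOperations)

-- number of elements in [a,b]
def cntIn (s : List Int) (a b : Int) : Nat := s.countP (fun x => decide (a ≤ x) && decide (x ≤ b))

theorem sortedIdx (s : List Int) (p : Int → Bool)
    (hp : ∀ x y : Int, x ≤ y → p y = true → p x = true)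
    (hs : s.Pairwise (fun a b => a ≤ b)) :
    ∀ (i : Nat) (hi : i < s.length), (p s[i] = true ↔ i < s.countP p) := by
  induction s with
  | nil => intro i hi; simp at hi
  | cons m t ih =>
    rw [List.pairwise_cons] at hs
    obtain ⟨hm, ht⟩ := hs
    intro i hi
    have hzero : p m = false → t.countP p = 0 := by
      intro hpm
      rw [List.countP_eq_zero]
      intro y hy hpy
      have := hp m y (hm y hy) hpy
      simp [hpm] at this
    by_cases hpm : p m = true
    · rw [List.countP_cons, if_pos hpm]
      cases i with
      | zero => simpa using hpm
      | succ i =>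
        have hi' : i < t.length := by simpa using hi
        have hih := ih ht i hi'
        simp only [List.getElem_cons_succ]
        rw [hih]
        omega
    · have hpm' : p m = false := by simpa using hpm
      have h0 := hzero hpm'
      rw [List.countP_cons, if_neg (by simp [hpm'])]
      cases i with
      | zero => simp [hpm', h0]
      | succ i =>
        have hi' : i < t.length := by simpa using hi
        have hih := ih ht i hi'
        simp only [List.getElem_cons_succ]
        rw [hih]
        omega

theorem bisectLeft_eq (s : List Int) (b : Int) (hs : s.Pairwise (fun a b => a ≤ b)) :
    PySem.List.bisectLeft s b = s.countP (fun x => decide (x < b)) := by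
  obtain ⟨h1, h2, h3⟩ := PySem.List.bisectLeft_spec s b hs
  have hcle : s.countP (fun x => decide (x < b)) ≤ s.length := s.countP_le_length
  have hidx := sortedIdx s (fun x => decide (x < b)) (by intro x y hxy h; simp only [decide_eq_true_eq] at *; omega) hs
  rcases Nat.lt_trichotomy (PySem.List.bisectLeft s b) (s.countP (fun x => decide (x < b))) with h | h | h
  · exfalso
    have hlt : PySem.List.bisectLeft s b < s.length := by omega
    have ha : s[PySem.List.bisectLeft s b] < b := by
      have := (hidx _ hlt).2 h
      simpa using this
    have hb := h3 _ hlt (le_refl _)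
    omega
  · exact h
  · exfalso
    have hlt : s.countP (fun x => decide (x < b)) < s.length := by omega
    have ha := h2 _ hlt h
    have hb := (hidx _ hlt).1 (by simpa using ha)
    omega

theorem bisectRight_eq (s : List Int) (b : Int) (hs : s.Pairwise (fun a b => a ≤ b)) :
    PySem.List.bisectRight s b = s.countP (fun x => decide (x ≤ b)) := by
  obtain ⟨h1, h2, h3⟩ := PySem.List.bisectRight_spec s b hs
  have hcle : s.countP (fun x => decide (x ≤ b)) ≤ s.length := s.countP_le_length
  have hidx := sortedIdx s (fun x => decide (x ≤ b)) (by intro x y hxy h; simp only [decide_eq_true_eq] at *; omega) hs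
  rcases Nat.lt_trichotomy (PySem.List.bisectRight s b) (s.countP (fun x => decide (x ≤ b))) with h | h | h
  · exfalso
    have hlt : PySem.List.bisectRight s b < s.length := by omega
    have ha : s[PySem.List.bisectRight s b] ≤ b := by
      have := (hidx _ hlt).2 h
      simpa using this
    have hb := h3 _ hlt (le_refl _)
    omega
  · exact h
  · exfalso
    have hlt : s.countP (fun x => decide (x ≤ b)) < s.length := by omega
    have ha := h2 _ hlt h
    have hb := (hidx _ hlt).1 (by simpa using ha)
    omega

theorem advI_eq (s : List Int) (b : Int) (hs : s.Pairwise (fun a b => a ≤ b)) :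
    ∀ (i : Nat), i ≤ s.countP (fun x => decide (x < b)) →
      advI s b i = s.countP (fun x => decide (x < b)) := by
  have hcle : s.countP (fun x => decide (x < b)) ≤ s.length := s.countP_le_length
  have hidx := sortedIdx s (fun x => decide (x < b)) (by intro x y hxy h; simp only [decide_eq_true_eq] at *; omega) hs
  have key : ∀ (d i : Nat), s.length - i ≤ d → i ≤ s.countP (fun x => decide (x < b)) →
      advI s b i = s.countP (fun x => decide (x < b)) := by
    intro d
    induction d with
    | zero =>
      intro i hd hi
      rw [advI]
      rw [dif_neg (by omega)]
      omega
    | succ d ihd =>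
      intro i hd hi
      rw [advI]
      by_cases h : i < s.length
      · rw [dif_pos h]
        by_cases hlt : s[i] < b
        · rw [if_pos hlt]
          have : i < s.countP (fun x => decide (x < b)) := (hidx i h).1 (by simpa using hlt)
          exact ihd (i + 1) (by omega) (by omega)
        · rw [if_neg hlt]
          have : ¬ i < s.countP (fun x => decide (x < b)) := by
            intro hcon
            exact hlt (by simpa using (hidx i h).2 hcon)
          omega
      · rw [dif_neg h]
        omega
  intro i hi
  exact key (s.length - i) i (le_refl _) hi

theorem advJ_eq (s : List Int) (b : Int) (hs : s.Pairwise (fun a b => a ≤ b)) :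
    ∀ (j : Nat), j ≤ s.countP (fun x => decide (x ≤ b)) →
      advJ s b j = s.countP (fun x => decide (x ≤ b)) := by
  have hcle : s.countP (fun x => decide (x ≤ b)) ≤ s.length := s.countP_le_length
  have hidx := sortedIdx s (fun x => decide (x ≤ b)) (by intro x y hxy h; simp only [decide_eq_true_eq] at *; omega) hs
  have key : ∀ (d j : Nat), s.length - j ≤ d → j ≤ s.countP (fun x => decide (x ≤ b)) →
      advJ s b j = s.countP (fun x => decide (x ≤ b)) := by
    intro d
    induction d with
    | zero =>
      intro j hd hj
      rw [advJ]
      rw [dif_neg (by omega)]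
      omega
    | succ d ihd =>
      intro j hd hj
      rw [advJ]
      by_cases h : j < s.length
      · rw [dif_pos h]
        by_cases hle : s[j] ≤ b
        · rw [if_pos hle]
          have : j < s.countP (fun x => decide (x ≤ b)) := (hidx j h).1 (by simpa using hle)
          exact ihd (j + 1) (by omega) (by omega)
        · rw [if_neg hle]
          have : ¬ j < s.countP (fun x => decide (x ≤ b)) := by
            intro hcon
            exact hle (by simpa using (hidx j h).2 hcon)
          omega
      · rw [dif_neg h]
        omega
  intro j hj
  exact key (s.length - j) j (le_refl _) hj

theorem cnt_diff (s : List Int) (a b : Int) (hab : a ≤ b + 1) :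
    (s.countP (fun x => decide (x ≤ b)) : Int) - (s.countP (fun x => decide (x < a)) : Int)
      = (cntIn s a b : Int) := by
  induction s with
  | nil => simp [cntIn]
  | cons x t ih =>
    simp only [cntIn, List.countP_cons] at *
    by_cases h1 : x ≤ b <;> by_cases h2 : x < a <;> by_cases h3 : a ≤ x <;>
      simp [h1, h2, h3] <;> push_cast <;> omega

-- Fval via element counts, on a sorted list with k ≥ 0
theorem Fval_eq (s : List Int) (k numOperations n : Int) (hk : 0 ≤ k)
    (hs : s.Pairwise (fun a b => a ≤ b)) :
    Fval s k numOperations n = min ((cntIn s (n - k) (n + k) : Int)) ((cntIn s n n : Int) + numOperations) := by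
  have hd1 := cnt_diff s (n - k) (n + k) (by omega)
  have hd2 := cnt_diff s n n (by omega)
  unfold Fval
  rw [bisectLeft_eq _ _ hs, bisectLeft_eq _ _ hs, bisectRight_eq _ _ hs, bisectRight_eq _ _ hs,
    hd1, hd2]

-- generic foldl-max lemmas
theorem foldl_max_init_le (g : Int → Int) (l : List Int) :
    ∀ (init : Int), init ≤ l.foldl (fun a c => max a (g c)) init := by
  induction l with
  | nil => intro init; simp
  | cons x t ih => intro init; exact le_trans (le_max_left _ _) (ih _)

theorem foldl_max_mem_le (g : Int → Int) (l : List Int) :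
    ∀ (init x : Int), x ∈ l → g x ≤ l.foldl (fun a c => max a (g c)) init := by
  induction l with
  | nil => intro init x hx; simp at hx
  | cons y t ih =>
    intro init x hx
    rcases List.mem_cons.mp hx with h | h
    · subst h; exact le_trans (le_max_right _ _) (foldl_max_init_le g t _)
    · exact ih _ x h

theorem foldl_max_le (g : Int → Int) (l : List Int) :
    ∀ (init m : Int), init ≤ m → (∀ x ∈ l, g x ≤ m) →
      l.foldl (fun a c => max a (g c)) init ≤ m := by
  induction l with
  | nil => intro init m h0 _; simpa
  | cons x t ih =>
    intro init m h0 h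
    exact ih _ _ (max_le h0 (h x List.mem_cons_self))
      (fun y hy => h y (List.mem_cons_of_mem _ hy))

-- A's fold, with the two pointers characterised, computes the max of Fval
theorem foldA_eq (s : List Int) (k numOperations : Int) (hs : s.Pairwise (fun a b => a ≤ b)) :
    ∀ (l : List Int), l.Pairwise (fun a b => a ≤ b) →
    ∀ (ans : Int) (i j : Nat),
      (∀ n ∈ l, i ≤ s.countP (fun x => decide (x < n - k)) ∧ j ≤ s.countP (fun x => decide (x ≤ n + k))) →
      (l.foldl (stepA s k numOperations) (ans, i, j)).1
        = l.foldl (fun a c => max a (Fval s k numOperations c)) ans := by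
  intro l
  induction l with
  | nil => intro _ ans i j _; simp
  | cons n t ih =>
    intro hl ans i j hbound
    rw [List.pairwise_cons] at hl
    obtain ⟨hn, ht⟩ := hl
    obtain ⟨hi, hj⟩ := hbound n List.mem_cons_self
    have hIi : advI s (n - k) i = s.countP (fun x => decide (x < n - k)) := advI_eq s _ hs i hi
    have hJj : advJ s (n + k) j = s.countP (fun x => decide (x ≤ n + k)) := advJ_eq s _ hs j hj
    simp only [List.foldl_cons]
    have hstep : stepA s k numOperations (ans, i, j) n
        = (max ans (Fval s k numOperations n),
           s.countP (fun x => decide (x < n - k)), s.countP (fun x => decide (x ≤ n + k))) := by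
      simp only [stepA, hIi, hJj, Fval, bisectLeft_eq _ _ hs, bisectRight_eq _ _ hs,
        Prod.mk.injEq]
      exact ⟨by omega, trivial⟩
    rw [hstep]
    apply ih ht
    intro m hm
    have hnm : n ≤ m := hn m hm
    constructor
    · refine List.countP_mono_left (fun x _ h => ?_)
      simp only [decide_eq_true_eq] at h ⊢
      omega
    · refine List.countP_mono_left (fun x _ h => ?_)
      simp only [decide_eq_true_eq] at h ⊢
      omega

-- the minimal element of a sorted list satisfying p
theorem exists_min_satisfying (s : List Int) (p : Int → Bool)
    (hs : s.Pairwise (fun a b => a ≤ b)) (hex : ∃ x ∈ s, p x = true) :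
    ∃ x ∈ s, p x = true ∧ ∀ y ∈ s, p y = true → x ≤ y := by
  induction s with
  | nil => simp at hex
  | cons m t ih =>
    rw [List.pairwise_cons] at hs
    obtain ⟨hm, ht⟩ := hs
    by_cases hpm : p m = true
    · refine ⟨m, List.mem_cons_self, hpm, ?_⟩
      intro y hy _
      rcases List.mem_cons.mp hy with h | h
      · omega
      · exact hm y h
    · obtain ⟨x, hx, hpx⟩ := hex
      rcases List.mem_cons.mp hx with h | h
      · subst h; exact absurd hpx hpm
      · obtain ⟨x', hx', hpx', hmin⟩ := ih ht ⟨x, h, hpx⟩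
        refine ⟨x', List.mem_cons_of_mem _ hx', hpx', ?_⟩
        intro y hy hpy
        rcases List.mem_cons.mp hy with h' | h'
        · subst h'; exact absurd hpy hpm
        · exact hmin y h' hpy

-- membership characterisation of cntIn
theorem cntIn_pos_iff (s : List Int) (a b : Int) :
    0 < cntIn s a b ↔ ∃ x ∈ s, a ≤ x ∧ x ≤ b := by
  unfold cntIn
  rw [List.countP_pos_iff]
  constructor
  · rintro ⟨x, hx, hp⟩
    simp only [Bool.and_eq_true, decide_eq_true_eq] at hp
    exact ⟨x, hx, hp⟩
  · rintro ⟨x, hx, h1, h2⟩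
    exact ⟨x, hx, by simp [h1, h2]⟩

theorem cntIn_self_eq_zero (s : List Int) (n : Int) (h : n ∉ s) : cntIn s n n = 0 := by
  unfold cntIn
  rw [List.countP_eq_zero]
  intro x hx hp
  simp only [Bool.and_eq_true, decide_eq_true_eq] at hp
  have : x = n := by omega
  subst this
  exact h hx

-- cntIn monotone when the interval only sees a superset of the elements
theorem cntIn_mono (s : List Int) (a b a' b' : Int)
    (h : ∀ x ∈ s, a ≤ x → x ≤ b → a' ≤ x ∧ x ≤ b') :
    cntIn s a b ≤ cntIn s a' b' := by
  refine List.countP_mono_left (fun x hx hp => ?_)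
  simp only [Bool.and_eq_true, decide_eq_true_eq] at hp ⊢
  exact h x hx hp.1 hp.2

-- ===== the combinatorial core: max of Fval over [lo,hi] = max of Fval over the candidates =====
theorem core_eq (s : List Int) (k numOperations lo hi : Int) (hk : 0 ≤ k)
    (hs : s.Pairwise (fun a b => a ≤ b))
    (hlo2 : ∀ x ∈ s, lo ≤ x)
    (hhi : hi ∈ s) (hhi2 : ∀ x ∈ s, x ≤ hi) :
    (PySem.List.pyRange lo (hi + 1) 1).foldl (fun a c => max a (Fval s k numOperations c)) 0
      = (s ++ s.map (fun x => x + k)).foldl (fun a c => max a (Fval s k numOperations c)) 0 := by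
  have hlohi : lo ≤ hi := hlo2 hi hhi
  apply le_antisymm
  · -- every n ∈ [lo,hi] is dominated by some candidate
    refine foldl_max_le _ _ 0 _ (foldl_max_init_le _ _ 0) ?_
    intro n hn
    rw [PySem.List.mem_pyRange_one] at hn
    by_cases hns : n ∈ s
    · exact foldl_max_mem_le _ _ 0 n (List.mem_append_left _ hns)
    · have hc0 : cntIn s n n = 0 := cntIn_self_eq_zero s n hns
      rw [Fval_eq s k numOperations n hk hs]
      by_cases hw : 0 < cntIn s (n - k) (n + k)
      · obtain ⟨x1, hx1, hx1w⟩ := (cntIn_pos_iff s _ _).mp hw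
        obtain ⟨x0, hx0, hpx0, hmin⟩ := exists_min_satisfying s
          (fun x => decide (n - k ≤ x) && decide (x ≤ n + k)) hs
          ⟨x1, hx1, by simp [hx1w.1, hx1w.2]⟩
        simp only [Bool.and_eq_true, decide_eq_true_eq] at hpx0
        have hcand : x0 + k ∈ s ++ s.map (fun x => x + k) :=
          List.mem_append_right _ (List.mem_map.mpr ⟨x0, hx0, rfl⟩)
        have hF : Fval s k numOperations (x0 + k)
            ≤ (s ++ s.map (fun x => x + k)).foldl (fun a c => max a (Fval s k numOperations c)) 0 :=
          foldl_max_mem_le _ _ 0 (x0 + k) hcand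
        rw [Fval_eq s k numOperations (x0 + k) hk hs] at hF
        have hW : cntIn s (n - k) (n + k) ≤ cntIn s (x0 + k - k) (x0 + k + k) := by
          refine cntIn_mono s _ _ _ _ (fun x hx h1 h2 => ?_)
          have := hmin x hx (by simp [h1, h2])
          omega
        have hc' : (0 : Int) ≤ (cntIn s (x0 + k) (x0 + k) : Int) := Int.natCast_nonneg _
        omega
      · have h0 : cntIn s (n - k) (n + k) = 0 := by omega
        have := foldl_max_init_le (fun c => Fval s k numOperations c)
          (s ++ s.map (fun x => x + k)) 0
        rw [h0, hc0]
        omega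
  · -- every candidate is dominated by some n ∈ [lo,hi]
    refine foldl_max_le _ _ 0 _ (foldl_max_init_le _ _ 0) ?_
    intro c hc
    by_cases h1 : c < lo
    · -- out of range on the left: dominated by lo
      have hmem : lo ∈ PySem.List.pyRange lo (hi + 1) 1 :=
        PySem.List.mem_pyRange_one.mpr ⟨le_refl _, by omega⟩
      have hF : Fval s k numOperations lo
          ≤ (PySem.List.pyRange lo (hi + 1) 1).foldl (fun a c => max a (Fval s k numOperations c)) 0 :=
        foldl_max_mem_le _ _ 0 lo hmem
      rw [Fval_eq s k numOperations lo hk hs] at hF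
      rw [Fval_eq s k numOperations c hk hs]
      have hc0 : cntIn s c c = 0 :=
        cntIn_self_eq_zero s c (fun hcs => by have := hlo2 c hcs; omega)
      have hW : cntIn s (c - k) (c + k) ≤ cntIn s (lo - k) (lo + k) := by
        refine cntIn_mono s _ _ _ _ (fun x hx hxa hxb => ?_)
        have := hlo2 x hx
        omega
      have hc' : (0 : Int) ≤ (cntIn s lo lo : Int) := Int.natCast_nonneg _
      omega
    · by_cases h2 : hi < c
      · -- out of range on the right: dominated by hi
        have hmem : hi ∈ PySem.List.pyRange lo (hi + 1) 1 :=
          PySem.List.mem_pyRange_one.mpr ⟨hlohi, by omega⟩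
        have hF : Fval s k numOperations hi
            ≤ (PySem.List.pyRange lo (hi + 1) 1).foldl (fun a c => max a (Fval s k numOperations c)) 0 :=
          foldl_max_mem_le _ _ 0 hi hmem
        rw [Fval_eq s k numOperations hi hk hs] at hF
        rw [Fval_eq s k numOperations c hk hs]
        have hc0 : cntIn s c c = 0 :=
          cntIn_self_eq_zero s c (fun hcs => by have := hhi2 c hcs; omega)
        have hW : cntIn s (c - k) (c + k) ≤ cntIn s (hi - k) (hi + k) := by
          refine cntIn_mono s _ _ _ _ (fun x hx hxa hxb => ?_)
          have := hhi2 x hx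
          omega
        have hc' : (0 : Int) ≤ (cntIn s hi hi : Int) := Int.natCast_nonneg _
        omega
      · -- in range
        have hmem : c ∈ PySem.List.pyRange lo (hi + 1) 1 :=
          PySem.List.mem_pyRange_one.mpr ⟨by omega, by omega⟩
        exact foldl_max_mem_le _ _ 0 c hmem

-- ===== main assembly =====
theorem main_eq (nums : List Int) (k numOperations : Int)
    (hne : nums ≠ []) (hk : 0 ≤ k) :
    maxFrequency_tle nums k numOperations = maxFrequency_tle_alt nums k numOperations := by
  have hs : (PySem.List.sorted nums (fun x => x) false).Pairwise (fun a b => a ≤ b) := by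
    have := PySem.List.sorted_pairwise nums (fun x => x)
    simpa using this
  set s := PySem.List.sorted nums (fun x => x) false with hsdef
  have hsne : s ≠ [] := by
    rw [hsdef, Ne, PySem.List.sorted_eq_nil_iff]
    exact hne
  have hlen : 0 < s.length := List.length_pos_iff.mpr hsne
  have h0 : PySem.List.pyGet? s 0 = some s[0] := by
    rw [PySem.List.pyGet?_zero]
    exact List.getElem?_eq_getElem hlen
  have hlast : PySem.List.pyGet? s (-1) = some (s.getLast hsne) := by
    rw [PySem.List.pyGet?_neg_one]
    exact List.getLast?_eq_some_getLast hsne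
  have hlo2 : ∀ x ∈ s, s[0] ≤ x := by
    intro x hx
    obtain ⟨i, hi, rfl⟩ := List.mem_iff_getElem.mp hx
    rcases Nat.eq_zero_or_pos i with h | h
    · subst h; exact le_refl _
    · exact (List.pairwise_iff_getElem.mp hs) 0 i hlen hi h
  have hhi : s.getLast hsne ∈ s := List.getLast_mem hsne
  have hhi2 : ∀ x ∈ s, x ≤ s.getLast hsne := by
    intro x hx
    obtain ⟨i, hi, rfl⟩ := List.mem_iff_getElem.mp hx
    rw [List.getLast_eq_getElem]
    rcases Nat.lt_or_ge i (s.length - 1) with h' | h'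
    · exact (List.pairwise_iff_getElem.mp hs) i (s.length - 1) hi (by omega) h'
    · have : i = s.length - 1 := by omega
      subst this
      exact le_refl _
  have hA : maxFrequency_tle nums k numOperations
      = ((PySem.List.pyRange s[0] (s.getLast hsne + 1) 1).foldl (stepA s k numOperations) (0, 0, 0)).1 := by
    unfold maxFrequency_tle
    rw [← hsdef]
    simp only [h0, hlast]
  have hB : maxFrequency_tle_alt nums k numOperations
      = (s ++ s.map (fun x => x + k)).foldl (fun a c => max a (Fval s k numOperations c)) 0 := by
    unfold maxFrequency_tle_alt
    rw [← hsdef]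
    rfl
  rw [hA, hB]
  rw [foldA_eq s k numOperations hs _
    ((PySem.List.pairwise_lt_pyRange_one _ _).imp (fun h => le_of_lt h)) 0 0 0
    (fun n _ => ⟨Nat.zero_le _, Nat.zero_le _⟩)]
  exact core_eq s k numOperations s[0] (s.getLast hsne) hk hs hlo2 hhi hhi2

-- ===== VERDICT (by name: the statement is the Claim_ definition above) =====
theorem maxFrequency_tle_spec : Claim_equal_maxFrequency_tle := by
  intro nums k numOperations _ hpre
  unfold Spec_maxFrequency_tle
  exact main_eq nums k numOperations hpre.1 hpre.2
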